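-- pv_equiv track=rewrite | github.com/secret-algorithm-study/algorithm-study | 준규/String/Java vs C++_3613.py | isCpp
-- ===== SOURCE A (Python) =====
-- def isCpp(variable):
--     # '_'로 시작하는지 체크
--     if variable.startswith('_'):
--         return False
--
--     # '_'로 끝나는지 체크
--     if variable.endswith('_'):
--         return False
--
--     # '__'가 포함되어 있는지 체크
--     if '__' in variable:
--         return False
--
--     # '_'가 적어도 하나 포함되어 있는지 체크
--     if '_' not in variable:
--         return False
--
--     # '_'로 단어를 분리
--     words = variable.split('_')
--
--     # 각 단어가 모두 소문자인지 체크
--     for word in words: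
--         # 단어가 비어있지 않은지 체크
--         if not word:
--             return False
--         # 단어가 소문자인지 체크
--         if not word.islower():
--             return False
--
--     # 모든 조건을 통과하면 True 반환
--     return True
-- ===== SOURCE B (Python) =====
-- def isCpp(variable):
--     # single left-to-right character scan; no split, no substring checks
--     seen_underscore = False
--     has_lower = False  # current word has seen a lowercase letter
--     for ch in variable:
--         if ch == '_':
--             if not has_lower:
--                 return False
--             seen_underscore = True
--             has_lower = False
--         elif ch.isupper():
--             return False
--         elif ch.islower():
--             has_lower = True
--     return seen_underscore and has_lower
-- ===== Notes on version B (the rewrite author's own statement) =====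
-- stated objective: alternative
-- what changed: B replaces A's staged substring checks plus split-then-validate with a single left-to-right character scan (a small state machine tracking seen_underscore and has_lower) that never builds the word list.
import Mathlib
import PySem

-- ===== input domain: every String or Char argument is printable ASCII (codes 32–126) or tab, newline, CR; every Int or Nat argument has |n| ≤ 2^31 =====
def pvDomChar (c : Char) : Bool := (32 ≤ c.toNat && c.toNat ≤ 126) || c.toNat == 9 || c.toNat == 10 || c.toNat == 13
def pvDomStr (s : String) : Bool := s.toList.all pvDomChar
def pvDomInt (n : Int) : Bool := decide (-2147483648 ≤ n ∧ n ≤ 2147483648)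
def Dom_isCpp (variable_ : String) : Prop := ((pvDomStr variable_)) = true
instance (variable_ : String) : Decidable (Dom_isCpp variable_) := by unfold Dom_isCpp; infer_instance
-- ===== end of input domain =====

-- B replaces A's substring checks + split + per-word loop by a single character scan (state machine); objective: alternative.

-- hand port of Python's str.islower(), called by A; exact on the ASCII
-- domain: at least one cased character and no uppercase one (ASCII cased chars are a-z, A-Z)
def pyStrIslower (cs : List Char) : Bool :=
  cs.any PySem.Chars.islower && cs.all (fun c => !PySem.Chars.isupper c)

-- ===== PORT A =====
-- A's for-loop over the words, with its two early returns
def isCppLoop : List (List Char) → Bool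
  | [] => true
  | w :: ws => if w.isEmpty then false else if !pyStrIslower w then false else isCppLoop ws

def isCpp (variable_ : String) : Bool :=
  if PySem.Str.startswith variable_ "_" then false
  else if PySem.Str.endswith variable_ "_" then false
  else if PySem.Str.isIn "__" variable_ then false
  else if !PySem.Str.isIn "_" variable_ then false
  else isCppLoop (PySem.Chars.splitOn variable_.toList "_".toList)

-- ===== PORT B =====
-- B's for-loop: state (seen_underscore, has_lower), early returns on '_' after a
-- lower-less word and on any uppercase character; per-char isupper/islower are
-- PySem.Chars.isupper/islower (exact on ASCII).
def isCppScan : List Char → Bool → Bool → Bool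
  | [], seen, hl => seen && hl
  | c :: t, seen, hl =>
    if c = '_' then
      if !hl then false else isCppScan t true false
    else if PySem.Chars.isupper c then false
    else if PySem.Chars.islower c then isCppScan t seen true
    else isCppScan t seen hl

def isCpp_alt (variable_ : String) : Bool :=
  isCppScan variable_.toList false false

-- ===== PRECONDITION & SPEC =====
def Spec_isCpp (variable_ : String) (out : Bool) : Prop := out = isCpp_alt variable_
instance (variable_ : String) (out : Bool) : Decidable (Spec_isCpp variable_ out) := by unfold Spec_isCpp; infer_instance

-- ===== CLAIM (what is proved, stated in full; the proofs are below) =====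
def Claim_equal_isCpp : Prop := ∀ (variable_ : String), Dom_isCpp variable_ → Spec_isCpp variable_ (isCpp variable_)

-- ===== LEMMAS AND PROOFS =====

-- a simple structural model of s.split('_'); A's splitOn is rewritten to it
def simpleSplit : List Char → List (List Char)
  | [] => [[]]
  | c :: t => if c = '_' then [] :: simpleSplit t else (simpleSplit t).modifyHead (c :: ·)

-- recursive model of "'__' in s": two adjacent underscores somewhere
def dbl : List Char → Bool
  | [] => false
  | [_] => false
  | a :: b :: t => (a == '_' && b == '_') || dbl (b :: t)

-- the pending state of B's scan, read off the split of the remaining input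
def scanModel (t : List Char) (hl : Bool) : Bool :=
  match simpleSplit t with
  | [] => true
  | w :: ws =>
    (w.all fun c => !PySem.Chars.isupper c) && (hl || w.any PySem.Chars.islower)
      && ws.all pyStrIslower

theorem simpleSplit_cons (c : Char) (t : List Char) :
    simpleSplit (c :: t) = if c = '_' then [] :: simpleSplit t
      else (simpleSplit t).modifyHead (c :: ·) := rfl

theorem simpleSplit_ne_nil (s : List Char) : simpleSplit s ≠ [] := by
  induction s with
  | nil => simp [simpleSplit]
  | cons c t ih =>
    rw [simpleSplit_cons]
    split_ifs
    · simp
    · cases h : simpleSplit t with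
      | nil => exact absurd h ih
      | cons w ws => simp

theorem go_spec (fuel : Nat) (s cur : List Char) (acc : List (List Char))
    (h : s.length ≤ fuel) :
    PySem.Chars.splitOn.go ['_'] fuel s cur acc
      = acc.reverse ++ (simpleSplit s).modifyHead (cur.reverse ++ ·) := by
  induction fuel generalizing s cur acc with
  | zero =>
    have : s = [] := by cases s <;> simp_all
    subst this
    simp [PySem.Chars.splitOn.go, simpleSplit]
  | succ f ih =>
    cases s with
    | nil => simp [PySem.Chars.splitOn.go, simpleSplit]
    | cons c t =>
      simp only [PySem.Chars.splitOn.go, List.isPrefixOf]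
      by_cases hc : c = '_'
      · subst hc
        simp only [BEq.rfl, Bool.and_true, if_pos, List.length_cons, List.length_nil,
          Nat.zero_add, List.drop_succ_cons, List.drop_zero]
        rw [ih t [] _ (by simpa using h)]
        simp only [simpleSplit, List.reverse_cons, List.append_assoc, List.singleton_append]
        cases simpleSplit t <;> simp
      · rw [if_neg (by simp [Ne.symm hc])]
        rw [ih t (c :: cur) acc (by simpa using h)]
        simp only [simpleSplit, if_neg hc]
        cases hsp : simpleSplit t with
        | nil => exact absurd hsp (simpleSplit_ne_nil t)
        | cons w ws => simp

theorem splitOn_eq (s : List Char) : PySem.Chars.splitOn s ['_'] = simpleSplit s := by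
  rw [PySem.Chars.splitOn, go_spec _ _ _ _ (by omega)]
  cases h : simpleSplit s with
  | nil => exact absurd h (simpleSplit_ne_nil s)
  | cons w ws => simp

theorem length_simpleSplit (s : List Char) : 2 ≤ (simpleSplit s).length ↔ '_' ∈ s := by
  induction s with
  | nil => simp [simpleSplit]
  | cons c t ih =>
    by_cases hc : c = '_'
    · subst hc
      rw [simpleSplit_cons, if_pos rfl]
      have h1 : 1 ≤ (simpleSplit t).length := List.length_pos_iff.mpr (simpleSplit_ne_nil t)
      constructor
      · intro _; simp
      · intro _; simp only [List.length_cons]; omega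
    · rw [simpleSplit_cons, if_neg hc, List.length_modifyHead, ih]
      simp only [List.mem_cons]
      constructor
      · intro h; exact Or.inr h
      · rintro (h | h)
        · exact absurd h.symm hc
        · exact h

theorem head_simpleSplit (s : List Char) (h : s.head? = some '_') : [] ∈ simpleSplit s := by
  cases s with
  | nil => simp at h
  | cons c t =>
    simp only [List.head?_cons, Option.some_inj] at h
    rw [simpleSplit_cons, if_pos h]
    exact List.mem_cons_self

theorem getLast_simpleSplit (s : List Char) (h : s.getLast? = some '_') :
    (simpleSplit s).getLast? = some [] := by
  induction s with
  | nil => simp at h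
  | cons c t ih =>
    cases t with
    | nil => simp at h; subst h; simp [simpleSplit]
    | cons d t' =>
      rw [List.getLast?_cons_cons] at h
      have hlast := ih h
      have hmem : '_' ∈ d :: t' := by
        obtain ⟨l', hl⟩ := List.getLast?_eq_some_iff.mp h
        rw [hl]; simp
      by_cases hc : c = '_'
      · cases hs : simpleSplit (d :: t') with
        | nil => exact absurd hs (simpleSplit_ne_nil _)
        | cons w ws =>
          rw [simpleSplit_cons, if_pos hc, hs, List.getLast?_cons_cons]
          rw [hs] at hlast; exact hlast
      · have h2 : 2 ≤ (simpleSplit (d :: t')).length := (length_simpleSplit _).mpr hmem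
        cases hs : simpleSplit (d :: t') with
        | nil => rw [hs] at h2; simp at h2
        | cons w ws =>
          cases ws with
          | nil => rw [hs] at h2; simp at h2
          | cons w2 ws2 =>
            rw [simpleSplit_cons, if_neg hc, hs, List.modifyHead_cons, List.getLast?_cons_cons]
            rw [hs, List.getLast?_cons_cons] at hlast
            exact hlast

theorem dbl_simpleSplit (s : List Char) (h : dbl s = true) :
    [] ∈ (simpleSplit s).tail := by
  induction s with
  | nil => simp [dbl] at h
  | cons c t ih =>
    cases t with
    | nil => simp [dbl] at h
    | cons d t' =>
      simp only [dbl, Bool.or_eq_true, Bool.and_eq_true, beq_iff_eq] at h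
      rcases h with ⟨hc, hd⟩ | h
      · subst hc; subst hd
        simp [simpleSplit_cons]
      · have hmem := ih h
        by_cases hc : c = '_'
        · rw [simpleSplit_cons, if_pos hc, List.tail_cons]
          exact List.mem_of_mem_tail hmem
        · cases hs : simpleSplit (d :: t') with
          | nil => exact absurd hs (simpleSplit_ne_nil _)
          | cons w ws =>
            rw [hs, List.tail_cons] at hmem
            rw [simpleSplit_cons, if_neg hc, hs, List.modifyHead_cons, List.tail_cons]
            exact hmem

theorem loop_eq_all (ws : List (List Char)) :
    isCppLoop ws = ws.all (fun w => !w.isEmpty && pyStrIslower w) := by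
  induction ws with
  | nil => rfl
  | cons w ws ih =>
    cases hw : w.isEmpty <;> cases hp : pyStrIslower w <;> simp [isCppLoop, hw, hp, ih]

theorem startswith_under (s : List Char) :
    PySem.Chars.startswith s ['_'] = true ↔ s.head? = some '_' := by
  cases s with
  | nil => simp [PySem.Chars.startswith, List.isPrefixOf]
  | cons c t =>
    simp [PySem.Chars.startswith, List.isPrefixOf, @eq_comm _ '_' c]

theorem endswith_under (s : List Char) :
    PySem.Chars.endswith s ['_'] = true ↔ s.getLast? = some '_' := by
  rw [PySem.Chars.endswith_iff]
  constructor
  · rintro ⟨t, rfl⟩; simp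
  · intro h
    obtain ⟨l', rfl⟩ := List.getLast?_eq_some_iff.mp h
    exact ⟨l', rfl⟩

theorem isIn_single (s : List Char) : PySem.Chars.isIn ['_'] s = true ↔ '_' ∈ s := by
  rw [PySem.Chars.isIn_iff_infix]
  constructor
  · intro h
    exact List.singleton_sublist.mp h.sublist
  · intro h
    obtain ⟨s1, t1, rfl⟩ := List.append_of_mem h
    exact ⟨s1, t1, by simp⟩

theorem prefix_two (s : List Char) :
    ['_', '_'] <+: s ↔ s.head? = some '_' ∧ s.tail.head? = some '_' := by
  cases s with
  | nil => simp
  | cons c t =>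
    cases t with
    | nil => simp [List.cons_prefix_cons]
    | cons d t' => simp [List.cons_prefix_cons, eq_comm]

theorem isIn_double (s : List Char) : PySem.Chars.isIn ['_', '_'] s = true ↔ dbl s = true := by
  rw [PySem.Chars.isIn_iff_infix]
  induction s with
  | nil => simp [dbl]
  | cons c t ih =>
    rw [List.infix_cons_iff, prefix_two]
    cases t with
    | nil => simp [dbl]
    | cons d t' =>
      rw [ih]
      simp only [dbl, List.head?_cons, List.tail_cons, Option.some_inj,
        Bool.or_eq_true, Bool.and_eq_true, beq_iff_eq]

theorem dbl_mem (s : List Char) (h : dbl s = true) : '_' ∈ s := by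
  induction s with
  | nil => simp [dbl] at h
  | cons c t ih =>
    cases t with
    | nil => simp [dbl] at h
    | cons d t' =>
      simp only [dbl, Bool.or_eq_true, Bool.and_eq_true, beq_iff_eq] at h
      rcases h with ⟨hc, _⟩ | h
      · simp [hc]
      · exact List.mem_cons_of_mem _ (ih h)

-- the scan's invariant: its result is 'an underscore is pending or ahead' && the split model
theorem scan_spec (t : List Char) (seen hl : Bool) :
    isCppScan t seen hl = ((seen || decide ('_' ∈ t)) && scanModel t hl) := by
  induction t generalizing seen hl with
  | nil => simp [isCppScan, scanModel, simpleSplit]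
  | cons c t ih =>
    by_cases hc : c = '_'
    · subst hc
      rw [show isCppScan ('_' :: t) seen hl
            = (if !hl then false else isCppScan t true false) from rfl]
      rw [scanModel, simpleSplit_cons, if_pos rfl]
      cases hl with
      | false => simp
      | true =>
        rw [if_neg (by simp), ih]
        rw [scanModel]
        cases hs : simpleSplit t with
        | nil => exact absurd hs (simpleSplit_ne_nil t)
        | cons w ws =>
          simp [pyStrIslower, Bool.and_comm]
    · rw [show isCppScan (c :: t) seen hl
            = (if c = '_' then (if !hl then false else isCppScan t true false)
               else if PySem.Chars.isupper c then false
               else if PySem.Chars.islower c then isCppScan t seen true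
               else isCppScan t seen hl) from rfl, if_neg hc]
      have hmem : ('_' ∈ c :: t) ↔ ('_' ∈ t) := by simp [Ne.symm hc]
      rw [scanModel, simpleSplit_cons, if_neg hc]
      cases hs : simpleSplit t with
      | nil => exact absurd hs (simpleSplit_ne_nil t)
      | cons w ws =>
        rw [List.modifyHead_cons]
        by_cases hu : PySem.Chars.isupper c = true
        · simp [hu]
        · rw [if_neg hu]
          by_cases hlw : PySem.Chars.islower c = true
          · rw [if_pos hlw, ih, scanModel, hs]
            simp [hmem, hu, hlw]
          · rw [if_neg hlw, ih, scanModel, hs]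
            simp [hmem, hu, hlw]

-- at the initial state the scan model is exactly "every word islower()"
theorem scanModel_false (t : List Char) :
    scanModel t false = (simpleSplit t).all pyStrIslower := by
  rw [scanModel]
  cases hs : simpleSplit t with
  | nil => exact absurd hs (simpleSplit_ne_nil t)
  | cons w ws => simp [pyStrIslower, Bool.and_comm]

-- "nonempty and islower" is just "islower" (an empty word has no cased character)
theorem nonempty_islower (w : List Char) :
    (!w.isEmpty && pyStrIslower w) = pyStrIslower w := by
  cases w <;> simp [pyStrIslower]

-- B in terms of A's split model
theorem alt_eq (v : String) :
    isCpp_alt v = (if (simpleSplit v.toList).length < 2 then false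
      else (simpleSplit v.toList).all (fun w => !w.isEmpty && pyStrIslower w)) := by
  rw [isCpp_alt, scan_spec, scanModel_false, Bool.false_or]
  simp only [nonempty_islower]
  by_cases hm : '_' ∈ v.toList
  · have := (length_simpleSplit v.toList).mpr hm
    rw [if_neg (by omega)]
    simp [hm]
  · have := (length_simpleSplit v.toList).not.mpr hm
    rw [if_pos (by omega)]
    simp [hm]

-- ===== VERDICT (by name: the statement is the Claim_ definition above) =====
theorem isCpp_spec : Claim_equal_isCpp := by
  intro v _
  show isCpp v = isCpp_alt v
  rw [alt_eq]
  unfold isCpp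
  simp only [PySem.Str.startswith_eq, PySem.Str.endswith_eq, PySem.Str.isIn_eq,
    show ("_" : String).toList = ['_'] from rfl,
    show ("__" : String).toList = ['_', '_'] from rfl,
    splitOn_eq, loop_eq_all]
  set L := v.toList with hL
  by_cases hU : '_' ∈ L
  · have hlen : ¬ (simpleSplit L).length < 2 := by
      have := (length_simpleSplit L).mpr hU; omega
    have hin : PySem.Chars.isIn ['_'] L = true := (isIn_single L).mpr hU
    rw [if_neg hlen]
    by_cases hall : (simpleSplit L).all (fun w => !w.isEmpty && pyStrIslower w) = true
    · have hne : [] ∉ simpleSplit L := by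
        intro hmem
        have := List.all_eq_true.mp hall _ hmem
        simp at this
      have h1 : PySem.Chars.startswith L ['_'] = false := by
        rw [Bool.eq_false_iff]; intro h
        exact hne (head_simpleSplit L ((startswith_under L).mp h))
      have h2 : PySem.Chars.endswith L ['_'] = false := by
        rw [Bool.eq_false_iff]; intro h
        have := getLast_simpleSplit L ((endswith_under L).mp h)
        obtain ⟨l', hl⟩ := List.getLast?_eq_some_iff.mp this
        exact hne (by rw [hl]; simp)
      have h3 : PySem.Chars.isIn ['_', '_'] L = false := by
        rw [Bool.eq_false_iff]; intro h
        exact hne (List.mem_of_mem_tail (dbl_simpleSplit L ((isIn_double L).mp h)))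
      simp [h1, h2, h3, hin, hall]
    · have hall' : (simpleSplit L).all (fun w => !w.isEmpty && pyStrIslower w) = false :=
        Bool.eq_false_iff.mpr hall
      split_ifs <;> simp [hall']
  · have hlen : (simpleSplit L).length < 2 := by
      have := (length_simpleSplit L).not.mpr hU; omega
    have hin : PySem.Chars.isIn ['_'] L = false := by
      rw [Bool.eq_false_iff]; intro h
      exact hU ((isIn_single L).mp h)
    have h1 : PySem.Chars.startswith L ['_'] = false := by
      rw [Bool.eq_false_iff]; intro h
      exact hU (List.mem_of_mem_head? ((startswith_under L).mp h))
    have h2 : PySem.Chars.endswith L ['_'] = false := by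
      rw [Bool.eq_false_iff]; intro h
      have := (endswith_under L).mp h
      obtain ⟨l', hl⟩ := List.getLast?_eq_some_iff.mp this
      exact hU (by rw [hl]; simp)
    have h3 : PySem.Chars.isIn ['_', '_'] L = false := by
      rw [Bool.eq_false_iff]; intro h
      exact hU (dbl_mem L ((isIn_double L).mp h))
    rw [if_pos hlen]
    simp [h1, h2, h3, hin]
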